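-- pv_equiv track=rewrite | github.com/DariaMinieieva/skyscrapers | skyscrapers.py | check_uniqueness_in_rows
-- ===== SOURCE A (Python) =====
-- def check_uniqueness_in_rows(board: list):
--     """
--     Check buildings of unique height in each row.
--
--     Return True if buildings in a row have unique length, False otherwise.
--
--     >>> check_uniqueness_in_rows(['***21**', '412453*', '423145*',\
--          '*543215', '*35214*', '*41532*', '*2*1***'])
--     True
--     >>> check_uniqueness_in_rows(['***21**', '452453*', '423145*',\
--          '*543215', '*35214*', '*41532*', '*2*1***'])
--     False
--     >>> check_uniqueness_in_rows(['***21**', '412453*', '423145*',\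
--          '*553215', '*35214*', '*41532*', '*2*1***'])
--     False
--     """
--     board = board[1:-1]
--     for row in board:
--         row = list(row)
--
--         row.pop(0)
--         row.pop(-1)
--
--         row = list(filter(lambda x: x != "*", row))
--
--         if len(row) != len(set(row)):
--             return False
--
--     return True
-- ===== SOURCE B (Python) =====
-- def check_uniqueness_in_rows(board: list):
--     """Sort each row's inner non-star characters and scan once for an
--     adjacent equal pair instead of comparing len(row) with len(set(row))."""
--     for row in board[1:-1]:
--         inner = sorted(c for c in row[1:-1] if c != "*")
--         if any(a == b for a, b in zip(inner, inner[1:])):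
--             return False
--     return True
-- ===== Notes on version B (the rewrite author's own statement) =====
-- stated objective: alternative
-- what changed: Duplicate detection per row is done by slicing row[1:-1], filtering stars, sorting the characters and scanning once for an adjacent equal pair, instead of mutating a list with pop() and comparing len(row) to len(set(row)).
-- outside the precondition, e.g. on check_uniqueness_in_rows(['a', '1221', '', 'b']): A returns False, B returns False
import Mathlib
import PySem

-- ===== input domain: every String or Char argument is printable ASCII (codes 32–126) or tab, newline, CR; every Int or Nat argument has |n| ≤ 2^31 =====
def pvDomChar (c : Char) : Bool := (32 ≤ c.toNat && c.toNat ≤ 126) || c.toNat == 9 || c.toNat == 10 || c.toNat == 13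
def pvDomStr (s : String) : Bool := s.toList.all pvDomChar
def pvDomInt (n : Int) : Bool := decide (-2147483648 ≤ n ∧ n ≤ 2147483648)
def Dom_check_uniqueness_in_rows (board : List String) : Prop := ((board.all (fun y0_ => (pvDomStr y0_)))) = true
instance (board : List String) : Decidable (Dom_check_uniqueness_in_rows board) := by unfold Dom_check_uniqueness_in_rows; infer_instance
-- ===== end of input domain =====

-- ===== PORT A =====
-- B differs from A only in how per-row duplicates are detected (sort + adjacent scan
-- instead of len/set comparison); equal return value proved on Pre_ (inner rows long
-- enough for A's pop calls not to raise IndexError).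

-- A's per-row body: row.pop(0); row.pop(-1); filter '*'; len(row) == len(set(row)).
-- none = the pop raised IndexError (row too short); excluded by Pre_.
def pvRowA (cs : List Char) : Option Bool :=
  match PySem.List.pop? cs 0 with
  | none => none
  | some (_, r1) =>
    match PySem.List.pop? r1 (-1) with
    | none => none
    | some (_, r2) =>
      let f := r2.filter (fun c => !(c == '*'))
      some (f.length == (PySem.Set.ofList f).length)

-- A's for-loop with early 'return False'; the 'none' branch is where Python raises
-- (value irrelevant there: outside Pre_).
def pvLoopA : List String → Bool
  | [] => true
  | row :: rest =>
    match pvRowA row.toList with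
    | none => true
    | some u => if u then pvLoopA rest else false

def check_uniqueness_in_rows (board : List String) : Bool :=
  pvLoopA (PySem.List.slice board (some 1) (some (-1)))

-- ===== PORT B =====
-- B's per-row test: sort the filtered inner characters, scan for an adjacent equal pair.
def pvRowDupB (row : String) : Bool :=
  let inner := (PySem.List.slice row.toList (some 1) (some (-1))).filter (fun c => !(c == '*'))
  let s := PySem.List.sorted inner (fun c => c)
  (s.zip s.tail).any (fun p => p.1 == p.2)

def check_uniqueness_in_rows_alt (board : List String) : Bool :=
  (PySem.List.slice board (some 1) (some (-1))).all (fun row => !(pvRowDupB row))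

-- ===== PRECONDITION & SPEC =====
-- Pre_ requires every row of board[1:-1] to have at least 2 characters: on shorter rows
-- A's row.pop calls raise IndexError. This is slightly narrower than the raising set
-- (A may still return False when a duplicate-bearing row precedes a short row, and B
-- returns False there too; see the cite in claim.json).
def Pre_check_uniqueness_in_rows (board : List String) : Prop :=
  ∀ row ∈ PySem.List.slice board (some 1) (some (-1)), 2 ≤ row.toList.length
instance (board : List String) : Decidable (Pre_check_uniqueness_in_rows board) := by
  unfold Pre_check_uniqueness_in_rows; infer_instance

def pvWitness_check_uniqueness_in_rows : List String := ["***", "412", "*2*"]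

def Spec_check_uniqueness_in_rows (board : List String) (out : Bool) : Prop := out = check_uniqueness_in_rows_alt board
instance (board : List String) (out : Bool) : Decidable (Spec_check_uniqueness_in_rows board out) := by unfold Spec_check_uniqueness_in_rows; infer_instance

-- ===== CLAIM (what is proved, stated in full; the proofs are below) =====
def Claim_equal_check_uniqueness_in_rows : Prop := ∀ (board : List String), Dom_check_uniqueness_in_rows board → Pre_check_uniqueness_in_rows board → Spec_check_uniqueness_in_rows board (check_uniqueness_in_rows board)

-- ===== LEMMAS AND PROOFS =====
-- (PySem.Set.ofList f).length counts f's distinct elements.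
theorem pvOfList_length (f : List Char) : (PySem.Set.ofList f).length = f.toFinset.card := by
  have hnd := PySem.Set.nodup_ofList f
  have hts : (PySem.Set.ofList f).toFinset = f.toFinset := by
    ext x; simp [List.mem_toFinset, PySem.Set.mem_ofList]
  rw [← hts, List.toFinset_card_of_nodup hnd]

-- A's per-row test is exactly Nodup of the filtered list.
theorem pvRowA_nodup (f : List Char) :
    (f.length == (PySem.Set.ofList f).length) = decide f.Nodup := by
  by_cases h : f.Nodup
  · simp [pvOfList_length, List.toFinset_card_of_nodup h, h]
  · have hne : f.dedup.length ≠ f.length := by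
      intro hlen
      exact h (List.dedup_eq_self.mp ((List.dedup_sublist f).eq_of_length hlen))
    have : (PySem.Set.ofList f).length = f.dedup.length := by
      rw [pvOfList_length, List.card_toFinset]
    simp only [this, h, decide_false, beq_eq_false_iff_ne, ne_eq]
    exact fun hl => hne hl.symm

-- B's adjacent scan on a ≤-sorted list detects exactly non-Nodup.
theorem pvAdj_nodup : ∀ (s : List Char), s.Pairwise (fun a b => a ≤ b) →
    ((s.zip s.tail).any (fun p => p.1 == p.2)) = !decide s.Nodup
  | [], _ => by simp
  | [a], _ => by simp
  | a :: b :: t, hp => by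
    have hab : a ≤ b := (List.pairwise_cons.mp hp).1 b (by simp)
    have hbt := (List.pairwise_cons.mp hp).2
    have ih := pvAdj_nodup (b :: t) hbt
    by_cases he : a = b
    · subst he; simp [List.zip, List.nodup_cons]
    · have hnot : a ∉ b :: t := by
        intro hm
        rcases List.mem_cons.mp hm with h | h
        · exact he h
        · exact he (le_antisymm hab ((List.pairwise_cons.mp hbt).1 a h))
      simp only [List.zip, List.tail_cons] at ih
      simp only [List.zip, List.tail_cons, List.zipWith_cons_cons, List.any_cons]
      rw [show ((a, b).1 == (a, b).2) = false by simp [he]]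
      simp only [Bool.false_or]
      rw [ih]
      simp [List.nodup_cons, hnot]

-- the two per-row tests agree on the same filtered list
theorem pvRow_eq (f : List Char) :
    (f.length == (PySem.Set.ofList f).length)
      = !(((PySem.List.sorted f (fun c => c)).zip (PySem.List.sorted f (fun c => c)).tail).any (fun p => p.1 == p.2)) := by
  rw [pvRowA_nodup, pvAdj_nodup _ (PySem.List.sorted_pairwise f (fun c => c))]
  have hperm : (PySem.List.sorted f (fun c => c)).Perm f := PySem.List.sorted_perm f (fun c => c) false
  by_cases h : f.Nodup
  · simp [h, hperm.nodup_iff.mpr h]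
  · simp [h, hperm.nodup_iff]

theorem pvPop_zero {α : Type} (a : α) (l : List α) : PySem.List.pop? (a :: l) 0 = some (a, l) := by
  simp [PySem.List.pop?, PySem.List.pyIdx?]

theorem pvPop_neg_one {α : Type} (l : List α) (h : l ≠ []) :
    ∃ x, PySem.List.pop? l (-1) = some (x, l.dropLast) := by
  have hlen : 1 ≤ l.length := List.length_pos_iff.mpr h
  refine ⟨l.getLast h, ?_⟩
  have hidx : PySem.List.pyIdx? l.length (-1) = some (l.length - 1) := by
    simp [PySem.List.pyIdx?]
    omega
  rw [PySem.List.pop?, hidx]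
  have hget : l[l.length - 1]? = some (l.getLast h) := by
    rw [List.getLast_eq_getElem]
    exact List.getElem?_eq_getElem (by omega)
  simp [hget, List.eraseIdx_length_sub_one]

theorem pvSlice_inner (a : Char) (l : List Char) (h : l ≠ []) :
    PySem.List.slice (a :: l) (some 1) (some (-1)) = l.dropLast := by
  have hlen : 1 ≤ l.length := List.length_pos_iff.mpr h
  have h1 : PySem.List.clampIdx (a :: l).length 1 = 1 := by
    simp [PySem.List.clampIdx]
  have h2 : PySem.List.clampIdx (a :: l).length (-1) = l.length := by
    simp [PySem.List.clampIdx]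
  rw [PySem.List.slice]
  simp only [h1, h2, List.drop_succ_cons, List.drop_zero]
  rw [← List.dropLast_eq_take]

-- per-row: A's pops succeed and both tests agree
theorem pvRow_main (row : String) (h : 2 ≤ row.toList.length) :
    pvRowA row.toList = some (!(pvRowDupB row)) := by
  rcases hcs : row.toList with _ | ⟨a, l⟩
  · rw [hcs] at h; simp at h
  · have hl : l ≠ [] := by
      intro he; rw [hcs, he] at h; simp at h
    obtain ⟨x, hx⟩ := pvPop_neg_one l hl
    simp only [pvRowA, pvPop_zero, hx, pvRowDupB, hcs, pvSlice_inner a l hl, pvRow_eq]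

-- the loop with early return equals the all-rows conjunction
theorem pvLoop_all : ∀ (rows : List String), (∀ r ∈ rows, 2 ≤ r.toList.length) →
    pvLoopA rows = rows.all (fun row => !(pvRowDupB row))
  | [], _ => rfl
  | row :: rest, h => by
    have hrow := pvRow_main row (h row (by simp))
    rw [pvLoopA, hrow, List.all_cons]
    by_cases hd : pvRowDupB row
    · simp [hd]
    · simp only [hd, Bool.not_false, Bool.true_and]
      exact pvLoop_all rest (fun r hr => h r (by simp [hr]))

-- ===== VERDICT (by name: the statement is the Claim_ definition above) =====
theorem check_uniqueness_in_rows_spec : Claim_equal_check_uniqueness_in_rows := by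
  intro board _ hpre
  unfold Spec_check_uniqueness_in_rows check_uniqueness_in_rows check_uniqueness_in_rows_alt
  exact pvLoop_all _ hpre
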